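-- pv_equiv track=rewrite | github.com/Open-Catalyst-Project/om-data | reactivity/omer_utils.py | replace_stars
-- ===== SOURCE A (Python) =====
-- def replace_stars(smiles):
--     smiles = smiles.replace('[*]', '*')
--     star_indices = [i for i, c in enumerate(smiles) if c == '*']
--     if len(star_indices) != 2:
--         raise ValueError("SMILES must contain exactly two '*' atoms.")
--
--     first_star_smiles = smiles[:star_indices[1]] + '[H]' + smiles[star_indices[1]+1:]
--     second_star_smiles = smiles[:star_indices[0]] + '[H]' + smiles[star_indices[0]+1:]
--
--     return first_star_smiles, second_star_smiles
-- ===== SOURCE B (Python) =====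
-- def replace_stars(smiles):
--     smiles = smiles.replace('[*]', '*')
--     parts = smiles.split('*')
--     if len(parts) != 3:
--         raise ValueError("SMILES must contain exactly two '*' atoms.")
--     first_star_smiles = parts[0] + '*' + parts[1] + '[H]' + parts[2]
--     second_star_smiles = parts[0] + '[H]' + parts[1] + '*' + parts[2]
--     return first_star_smiles, second_star_smiles
-- ===== Notes on version B (the rewrite author's own statement) =====
-- stated objective: simpler
-- what changed: Replaces the enumerate-index-list plus double slicing with a single split('*') into three segments and direct reconstruction of the two variants.
import Mathlib
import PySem

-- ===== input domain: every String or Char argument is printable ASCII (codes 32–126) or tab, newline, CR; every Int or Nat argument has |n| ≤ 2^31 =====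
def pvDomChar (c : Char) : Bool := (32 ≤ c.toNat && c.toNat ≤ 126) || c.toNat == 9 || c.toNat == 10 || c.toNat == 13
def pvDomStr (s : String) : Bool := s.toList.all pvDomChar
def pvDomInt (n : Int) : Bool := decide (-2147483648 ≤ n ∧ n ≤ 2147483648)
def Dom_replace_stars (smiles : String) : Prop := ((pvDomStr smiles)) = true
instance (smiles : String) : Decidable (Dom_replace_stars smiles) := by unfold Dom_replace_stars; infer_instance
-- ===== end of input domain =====

-- B replaces A's enumerate-index-list plus double slicing by split('*') into three
-- segments and direct reconstruction; same ValueError condition, excluded by Pre_.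

-- ===== PORT A =====
def replace_stars (smiles : String) : String × String :=
  let t := PySem.Str.replace smiles "[*]" "*"
  let star_indices : List Int :=
    ((PySem.List.enumerate t.toList 0).filter (fun p => p.2 == '*')).map (·.1)
  if star_indices.length ≠ 2 then ("", "")  -- Python raises ValueError here; outside Pre_
  else
    let i0 := PySem.List.pyGetD star_indices 0 0
    let i1 := PySem.List.pyGetD star_indices 1 0
    let first_star_smiles :=
      PySem.Str.slice t none (some i1) ++ "[H]" ++ PySem.Str.slice t (some (i1 + 1)) none
    let second_star_smiles :=
      PySem.Str.slice t none (some i0) ++ "[H]" ++ PySem.Str.slice t (some (i0 + 1)) none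
    (first_star_smiles, second_star_smiles)

-- ===== PORT B =====
def replace_stars_alt (smiles : String) : String × String :=
  let t := PySem.Str.replace smiles "[*]" "*"
  let parts := (PySem.Str.split? t "*").getD []   -- sep "*" is nonempty, so split? is `some`
  if parts.length ≠ 3 then ("", "")  -- Python raises ValueError here; outside Pre_
  else
    let p0 := PySem.List.pyGetD parts 0 ""
    let p1 := PySem.List.pyGetD parts 1 ""
    let p2 := PySem.List.pyGetD parts 2 ""
    (p0 ++ "*" ++ p1 ++ "[H]" ++ p2, p0 ++ "[H]" ++ p1 ++ "*" ++ p2)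

-- ===== PRECONDITION & SPEC =====
-- Pre_ excludes exactly the inputs on which Python A (and B) raise ValueError:
-- those whose normalized SMILES does not contain exactly two '*' characters.
def Pre_replace_stars (smiles : String) : Prop :=
  (PySem.Str.replace smiles "[*]" "*").toList.count '*' = 2
instance (smiles : String) : Decidable (Pre_replace_stars smiles) := by
  unfold Pre_replace_stars; infer_instance
def pvWitness_replace_stars : String := "C[*]N*O"

def Spec_replace_stars (smiles : String) (out : String × String) : Prop := out = replace_stars_alt smiles
instance (smiles : String) (out : String × String) : Decidable (Spec_replace_stars smiles out) := by unfold Spec_replace_stars; infer_instance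

-- ===== CLAIM (what is proved, stated in full; the proofs are below) =====
def Claim_equal_replace_stars : Prop := ∀ (smiles : String), Dom_replace_stars smiles → Pre_replace_stars smiles → Spec_replace_stars smiles (replace_stars smiles)

-- ===== LEMMAS AND PROOFS =====

-- a list containing '*' exactly once splits around that occurrence
theorem count_one_decomp (s : List Char) (h : s.count '*' = 1) :
    ∃ a c, s = a ++ '*' :: c ∧ '*' ∉ a ∧ '*' ∉ c := by
  induction s with
  | nil => simp at h
  | cons x t ih =>
    by_cases hx : x = '*'
    · subst hx
      have hc : t.count '*' = 0 := by simpa [List.count_cons] using h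
      exact ⟨[], t, by simp, by simp, by simpa [List.count_eq_zero] using hc⟩
    · have ht : t.count '*' = 1 := by simpa [List.count_cons, hx] using h
      obtain ⟨a, c, rfl, ha, hc⟩ := ih ht
      exact ⟨x :: a, c, by simp,
        fun hm => (List.mem_cons.1 hm).elim (fun h' => hx h'.symm) ha, hc⟩

-- a list containing '*' exactly twice splits around the two occurrences
theorem count_two_decomp (s : List Char) (h : s.count '*' = 2) :
    ∃ a b c, s = a ++ '*' :: (b ++ '*' :: c) ∧ '*' ∉ a ∧ '*' ∉ b ∧ '*' ∉ c := by
  induction s with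
  | nil => simp at h
  | cons x t ih =>
    by_cases hx : x = '*'
    · subst hx
      have ht : t.count '*' = 1 := by simpa [List.count_cons] using h
      obtain ⟨b, c, rfl, hb, hc⟩ := count_one_decomp t ht
      exact ⟨[], b, c, by simp, by simp, hb, hc⟩
    · have ht : t.count '*' = 2 := by simpa [List.count_cons, hx] using h
      obtain ⟨a, b, c, rfl, ha, hb, hc⟩ := ih ht
      exact ⟨x :: a, b, c, by simp,
        fun hm => (List.mem_cons.1 hm).elim (fun h' => hx h'.symm) ha, hb, hc⟩

-- A-side: enumerating a star-free segment contributes nothing to the filter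
theorem filter_enum_no_star (a : List Char) (k : Int) (h : '*' ∉ a) :
    (PySem.List.enumerate a k).filter (fun p => p.2 == '*') = [] := by
  rw [List.filter_eq_nil_iff]
  intro p hp
  obtain ⟨i, hi, rfl⟩ := (PySem.List.mem_enumerate_iff _ _ _).1 hp
  have : a[i] ∈ a := List.getElem_mem hi
  simp only [beq_iff_eq]
  exact fun he => h (he ▸ this)

-- A-side: the star-index list of the decomposed string
theorem star_indices_eq (a b c : List Char) (ha : '*' ∉ a) (hb : '*' ∉ b) (hc : '*' ∉ c) :
    (((PySem.List.enumerate (a ++ '*' :: (b ++ '*' :: c)) 0).filter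
        (fun p => p.2 == '*')).map (·.1)) =
      [(a.length : Int), (a.length : Int) + 1 + b.length] := by
  rw [PySem.List.enumerate_append, PySem.List.enumerate_cons, PySem.List.enumerate_append,
      PySem.List.enumerate_cons]
  simp [List.filter_append, filter_enum_no_star _ _ ha, filter_enum_no_star _ _ hb,
        filter_enum_no_star _ _ hc]

-- B-side: fuel-generic unfolding of splitOn.go on the empty list
theorem go_nil (f : Nat) (cur : List Char) (acc : List (List Char)) :
    PySem.Chars.splitOn.go ['*'] f [] cur acc = (cur.reverse :: acc).reverse := by
  cases f <;> simp [PySem.Chars.splitOn.go]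

-- B-side: splitOn.go consumes a leading '*'
theorem go_star (f : Nat) (l cur : List Char) (acc : List (List Char)) :
    PySem.Chars.splitOn.go ['*'] (f + 1) ('*' :: l) cur acc =
      PySem.Chars.splitOn.go ['*'] f l [] (cur.reverse :: acc) := by
  simp [PySem.Chars.splitOn.go]

-- B-side: splitOn.go accumulates a non-star character
theorem go_other (f : Nat) (x : Char) (l cur : List Char) (acc : List (List Char))
    (h : x ≠ '*') :
    PySem.Chars.splitOn.go ['*'] (f + 1) (x :: l) cur acc =
      PySem.Chars.splitOn.go ['*'] f l (x :: cur) acc := by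
  simp only [PySem.Chars.splitOn.go]
  simp [List.isPrefixOf]
  intro hx
  exact absurd hx.symm h

-- B-side: splitOn.go skips a whole star-free segment
theorem go_skip (a : List Char) (h : '*' ∉ a) :
    ∀ (f : Nat) (l cur : List Char) (acc : List (List Char)),
      PySem.Chars.splitOn.go ['*'] (f + a.length) (a ++ l) cur acc =
        PySem.Chars.splitOn.go ['*'] f l (a.reverse ++ cur) acc := by
  induction a with
  | nil => intro f l cur acc; simp
  | cons x t ih =>
    intro f l cur acc
    have hx : x ≠ '*' := fun he => h (he ▸ List.mem_cons_self)
    have ht : '*' ∉ t := fun hm => h (List.mem_cons_of_mem _ hm)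
    have : f + (x :: t).length = (f + t.length) + 1 := by simp; omega
    rw [this, List.cons_append, go_other _ _ _ _ _ hx, ih ht]
    simp

-- B-side: splitOn of the decomposed string
theorem splitOn_eq (a b c : List Char) (ha : '*' ∉ a) (hb : '*' ∉ b) (hc : '*' ∉ c) :
    PySem.Chars.splitOn (a ++ '*' :: (b ++ '*' :: c)) ['*'] = [a, b, c] := by
  unfold PySem.Chars.splitOn
  have hlen : (a ++ '*' :: (b ++ '*' :: c)).length + 1 =
      (((c.length + 1) + 1 + b.length) + 1) + a.length := by simp; omega
  rw [hlen, go_skip a ha, go_star, go_skip b hb, go_star]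
  have htail := go_skip c hc 1 [] [] [(b.reverse ++ []).reverse, (a.reverse ++ []).reverse]
  rw [List.append_nil, Nat.add_comm 1 c.length] at htail
  rw [htail, go_nil]
  simp

-- both builds, expressed on the decomposition a ++ '*' :: b ++ '*' :: c, give the same pair
theorem core_tail (t : String) (a b c : List Char)
    (hs : t.toList = a ++ '*' :: (b ++ '*' :: c)) :
    (PySem.Str.slice t none (some ((a.length:Int) + 1 + b.length)) ++ "[H]" ++
       PySem.Str.slice t (some ((a.length:Int) + 1 + b.length + 1)) none,
     PySem.Str.slice t none (some (a.length:Int)) ++ "[H]" ++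
       PySem.Str.slice t (some ((a.length:Int) + 1)) none) =
    (String.ofList a ++ "*" ++ String.ofList b ++ "[H]" ++ String.ofList c,
     String.ofList a ++ "[H]" ++ String.ofList b ++ "*" ++ String.ofList c) := by
  simp only [Prod.mk.injEq]
  constructor
  · apply String.toList_inj.mp
    simp only [String.toList_append, PySem.Str.toList_slice, PySem.Chars.slice_eq_listSlice, hs]
    rw [PySem.List.slice_to _ (by positivity), PySem.List.slice_from _ (by positivity)]
    have e1 : ((a.length:Int) + 1 + (b.length:Int)).toNat = (a ++ '*' :: b).length := by
      simp; omega
    have e2 : ((a.length:Int) + 1 + (b.length:Int) + 1).toNat = (a ++ '*' :: b).length + 1 := by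
      simp; omega
    rw [e1, e2, show a ++ '*' :: (b ++ '*' :: c) = (a ++ '*' :: b) ++ '*' :: c by simp,
        List.take_left, List.drop_append]
    simp
  · apply String.toList_inj.mp
    simp only [String.toList_append, PySem.Str.toList_slice, PySem.Chars.slice_eq_listSlice, hs]
    rw [PySem.List.slice_to _ (by positivity), PySem.List.slice_from _ (by positivity)]
    have e1 : ((a.length:Int)).toNat = a.length := by simp
    have e2 : ((a.length:Int) + 1).toNat = a.length + 1 := by omega
    rw [e1, e2, List.take_append,
        show a ++ '*' :: (b ++ '*' :: c) = (a ++ ['*']) ++ (b ++ '*' :: c) by simp,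
        List.drop_append]
    simp

-- the main computation lemma, on an arbitrary already-normalized string
theorem core_eq (t : String) (h : t.toList.count '*' = 2) :
    (let star_indices : List Int :=
      ((PySem.List.enumerate t.toList 0).filter (fun p => p.2 == '*')).map (·.1)
     if star_indices.length ≠ 2 then (("" : String), ("" : String))
     else
       let i0 := PySem.List.pyGetD star_indices 0 0
       let i1 := PySem.List.pyGetD star_indices 1 0
       (PySem.Str.slice t none (some i1) ++ "[H]" ++ PySem.Str.slice t (some (i1 + 1)) none,
        PySem.Str.slice t none (some i0) ++ "[H]" ++ PySem.Str.slice t (some (i0 + 1)) none)) =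
    (let parts := (PySem.Str.split? t "*").getD []
     if parts.length ≠ 3 then (("" : String), ("" : String))
     else
       (PySem.List.pyGetD parts 0 "" ++ "*" ++ PySem.List.pyGetD parts 1 "" ++ "[H]" ++
          PySem.List.pyGetD parts 2 "",
        PySem.List.pyGetD parts 0 "" ++ "[H]" ++ PySem.List.pyGetD parts 1 "" ++ "*" ++
          PySem.List.pyGetD parts 2 "")) := by
  obtain ⟨a, b, c, hs, ha, hb, hc⟩ := count_two_decomp t.toList h
  have hidx := star_indices_eq a b c ha hb hc
  have hsplit : PySem.Str.split? t "*" =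
      some [String.ofList a, String.ofList b, String.ofList c] := by
    simp [PySem.Str.split?, PySem.Chars.split?, hs, splitOn_eq a b c ha hb hc]
  simp only [hs, hidx, hsplit, Option.getD_some, List.length_cons, List.length_nil]
  norm_num [PySem.List.pyGetD, PySem.List.pyGet?, PySem.List.pyIdx?, show ((2:Int).toNat = 2) from rfl]
  have := core_tail t a b c hs
  simp only [Prod.mk.injEq] at this
  exact this

-- ===== VERDICT (by name: the statement is the Claim_ definition above) =====
theorem replace_stars_spec : Claim_equal_replace_stars := by
  intro smiles _ hpre
  unfold Spec_replace_stars replace_stars replace_stars_alt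
  exact core_eq _ hpre
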